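-- pv_equiv track=rewrite | github.com/redpigkiller/MyPkg | mypkg/utils/text_diff.py | _wrap_with_annotations
-- ===== SOURCE A (Python) =====
-- import unicodedata
--
-- def get_char_width(char: str) -> int:
--     """Get the visual display width of a character."""
--     if char == "\t":
--         return 4  # Expand tab to 4 spaces
--     width_type = unicodedata.east_asian_width(char)
--     return 2 if width_type in ("W", "F") else 1
--
-- def _wrap_with_annotations(
--     text: str, full_ann: str, col_width: int
-- ) -> tuple[list[str], list[str]]:
--     """Helper to wrap text alongside its character-level annotations."""
--     if not text:
--         return [""], [""]
--     parts, anns = [], []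
--     current, current_ann, current_w = "", "", 0
--     ann_idx = 0
--     for c in text:
--         cw = get_char_width(c)
--         if current_w + cw > col_width:
--             parts.append(current)
--             anns.append(current_ann)
--             current = c
--             current_ann = full_ann[ann_idx : ann_idx + cw]
--             current_w = cw
--         else:
--             current += c
--             current_ann += full_ann[ann_idx : ann_idx + cw]
--             current_w += cw
--         ann_idx += cw
--
--     if current:
--         parts.append(current)
--         anns.append(current_ann)
--     return parts, anns
-- ===== SOURCE B (Python) =====
-- import unicodedata
--
-- def get_char_width(char: str) -> int:
--     if char == "\t":
--         return 4
--     width_type = unicodedata.east_asian_width(char)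
--     return 2 if width_type in ("W", "F") else 1
--
-- def _wrap_with_annotations(text, full_ann, col_width):
--     """Record line break points as index spans in one pass, then slice."""
--     if not text:
--         return [""], [""]
--     spans = []          # (text_start, text_end, ann_start, ann_end)
--     ti = ai = 0         # start of current line in text / annotation stream
--     w = 0               # display width of current line
--     pos = 0             # cumulative display width = annotation cursor
--     for i, c in enumerate(text):
--         cw = get_char_width(c)
--         if w + cw > col_width:
--             spans.append((ti, i, ai, pos))
--             ti, ai, w = i, pos, cw
--         else:
--             w += cw
--         pos += cw
--     spans.append((ti, len(text), ai, pos))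
--     parts = [text[a:b] for a, b, _, _ in spans]
--     anns = [full_ann[a:b] for _, _, a, b in spans]
--     return parts, anns
-- ===== Notes on version B (the rewrite author's own statement) =====
-- stated objective: faster
-- what changed: B replaces A's four growing accumulator strings with a pass that only records each line's (text_start, text_end, ann_start, ann_end) index spans, then produces both output lists by slicing text and full_ann once per line, avoiding per-character string concatenation and per-character annotation slicing.
import Mathlib
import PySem

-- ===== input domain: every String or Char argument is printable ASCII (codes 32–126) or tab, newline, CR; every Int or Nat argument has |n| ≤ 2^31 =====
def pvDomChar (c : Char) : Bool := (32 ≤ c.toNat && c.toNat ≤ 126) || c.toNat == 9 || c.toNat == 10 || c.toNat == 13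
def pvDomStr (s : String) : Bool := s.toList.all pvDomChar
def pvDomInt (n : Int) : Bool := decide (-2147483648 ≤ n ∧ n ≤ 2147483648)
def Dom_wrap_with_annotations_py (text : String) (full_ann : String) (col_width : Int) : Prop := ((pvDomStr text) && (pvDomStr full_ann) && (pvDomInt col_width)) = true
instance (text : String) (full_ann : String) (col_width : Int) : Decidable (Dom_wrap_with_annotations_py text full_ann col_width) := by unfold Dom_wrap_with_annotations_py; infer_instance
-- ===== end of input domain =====

-- B records each line as a pair of index spans (into text and into the annotation
-- stream) during the single greedy pass and slices the two strings once at the end,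
-- instead of growing four accumulator strings character by character (objective: faster, measured).

-- ===== PORT A =====
-- get_char_width: exact on Dom (printable ASCII + tab/newline/CR: east_asian_width
-- is "Na"/"N" for all of them, never "W"/"F", so every non-tab char has width 1).
def pvWidth (c : Char) : Int := if c = '\t' then 4 else 1

-- one iteration of A's `for c in text` loop; state = (parts, anns, current, current_ann, current_w, ann_idx)
def wrapA_step (col_width : Int) (ann : List Char)
    (st : List String × List String × List Char × List Char × Int × Int) (c : Char) :
    List String × List String × List Char × List Char × Int × Int :=
  match st with
  | (parts, anns, cur, curAnn, curW, annIdx) =>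
    let cw := pvWidth c
    if curW + cw > col_width then
      (parts ++ [String.ofList cur], anns ++ [String.ofList curAnn], [c],
       PySem.List.slice ann (some annIdx) (some (annIdx + cw)), cw, annIdx + cw)
    else
      (parts, anns, cur ++ [c], curAnn ++ PySem.List.slice ann (some annIdx) (some (annIdx + cw)),
       curW + cw, annIdx + cw)

-- A's trailing `if current: parts.append(...)`
def wrapA_finish (st : List String × List String × List Char × List Char × Int × Int) :
    List String × List String :=
  match st with
  | (parts, anns, cur, curAnn, _, _) =>
    if cur ≠ [] then (parts ++ [String.ofList cur], anns ++ [String.ofList curAnn]) else (parts, anns)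

def wrap_with_annotations_py (text : String) (full_ann : String) (col_width : Int) :
    List String × List String :=
  if text.toList = [] then ([""], [""])
  else
    wrapA_finish (text.toList.foldl (wrapA_step col_width full_ann.toList) ([], [], [], [], 0, 0))

-- ===== PORT B =====
-- one iteration of B's `for i, c in enumerate(text)` loop; state = (spans, ti, ai, w, pos)
def wrapB_step (col_width : Int)
    (st : List (Int × Int × Int × Int) × Int × Int × Int × Int) (p : Int × Char) :
    List (Int × Int × Int × Int) × Int × Int × Int × Int :=
  match st, p with
  | (spans, ti, ai, w, pos), (i, c) =>
    let cw := pvWidth c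
    if w + cw > col_width then (spans ++ [(ti, i, ai, pos)], i, pos, cw, pos + cw)
    else (spans, ti, ai, w + cw, pos + cw)

-- B's final span append and the two slicing comprehensions
def wrapB_finish (s ann : List Char) (st : List (Int × Int × Int × Int) × Int × Int × Int × Int) :
    List String × List String :=
  match st with
  | (spans, ti, ai, _, pos) =>
    let spans := spans ++ [(ti, ((s.length : Int)), ai, pos)]
    (spans.map (fun q => String.ofList (PySem.List.slice s (some q.1) (some q.2.1))),
     spans.map (fun q => String.ofList (PySem.List.slice ann (some q.2.2.1) (some q.2.2.2))))

def wrap_with_annotations_py_alt (text : String) (full_ann : String) (col_width : Int) :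
    List String × List String :=
  if text.toList = [] then ([""], [""])
  else
    wrapB_finish text.toList full_ann.toList
      ((PySem.List.enumerate text.toList).foldl (wrapB_step col_width) ([], 0, 0, 0, 0))

-- ===== PRECONDITION & SPEC =====
def Spec_wrap_with_annotations_py (text : String) (full_ann : String) (col_width : Int) (out : List String × List String) : Prop := out = wrap_with_annotations_py_alt text full_ann col_width
instance (text : String) (full_ann : String) (col_width : Int) (out : List String × List String) : Decidable (Spec_wrap_with_annotations_py text full_ann col_width out) := by unfold Spec_wrap_with_annotations_py; infer_instance

-- ===== CLAIM (what is proved, stated in full; the proofs are below) =====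
def Claim_equal_wrap_with_annotations_py : Prop := ∀ (text : String) (full_ann : String) (col_width : Int), Dom_wrap_with_annotations_py text full_ann col_width → Spec_wrap_with_annotations_py text full_ann col_width (wrap_with_annotations_py text full_ann col_width)

-- ===== LEMMAS AND PROOFS =====

-- pvWidth is a positive natural number
lemma pvWidth_nat (c : Char) : ∃ k : Nat, pvWidth c = (k : Int) ∧ 0 < k := by
  unfold pvWidth; split
  · exact ⟨4, rfl, by omega⟩
  · exact ⟨1, rfl, by omega⟩

-- one char sliced out of a list
lemma take_one_drop (l : List Char) (i : Nat) (h : i < l.length) :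
    (l.drop i).take 1 = [l[i]] := by
  rw [← List.getElem_cons_drop h]; rfl

-- concatenating adjacent clamped slices
lemma take_drop_append (l : List Char) (a b c : Nat) (hab : a ≤ b) :
    (l.drop a).take (b - a) ++ (l.drop b).take (c - b) = (l.drop a).take (c - a) ∨ c < b := by
  by_cases hbc : b ≤ c
  · left
    have h1 : c - a = (b - a) + (c - b) := by omega
    rw [h1, List.take_add, List.drop_drop]
    have h2 : a + (b - a) = b := by omega
    rw [h2]
  · right; omega

-- the main loop invariant: starting from matching states, A's fold+finish equals B's fold+finish
lemma wrap_loop (s ann : List Char) (cwid : Int) :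
    ∀ (rest : List Char) (i tn an pn : Nat) (spans : List (Int × Int × Int × Int)) (w : Int),
      s.drop i = rest → i ≤ s.length → tn ≤ i → an ≤ pn → (tn < i ∨ rest ≠ []) →
      wrapA_finish (rest.foldl (wrapA_step cwid ann)
        (spans.map (fun q => String.ofList (PySem.List.slice s (some q.1) (some q.2.1))),
         spans.map (fun q => String.ofList (PySem.List.slice ann (some q.2.2.1) (some q.2.2.2))),
         (s.drop tn).take (i - tn), (ann.drop an).take (pn - an), w, (pn : Int)))
      = wrapB_finish s ann ((PySem.List.enumerate rest (i : Int)).foldl (wrapB_step cwid)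
          (spans, (tn : Int), (an : Int), w, (pn : Int))) := by
  intro rest
  induction rest with
  | nil =>
    intro i tn an pn spans w hdrop hi htn han hne
    have hlen : s.length ≤ i := by
      by_contra h
      have : s.drop i ≠ [] := by
        simp [List.drop_eq_nil_iff]; omega
      exact this hdrop
    have hieq : i = s.length := by omega
    have htn' : tn < i := by rcases hne with h | h; exact h; simp at h
    have hcur : (s.drop tn).take (i - tn) ≠ [] := by
      simp [List.take_eq_nil_iff, List.drop_eq_nil_iff]
      omega
    simp only [List.foldl_nil, PySem.List.enumerate, wrapA_finish, wrapB_finish, hcur,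
      if_true, ne_eq, not_false_iff, List.map_append, List.map_cons, List.map_nil,
      PySem.List.slice_natCast]
    rw [hieq]
  | cons c rest ih =>
    intro i tn an pn spans w hdrop hi htn han hne
    have hilen : i < s.length := by
      by_contra h
      have : s.drop i = [] := List.drop_eq_nil_iff.mpr (by omega)
      rw [hdrop] at this; simp at this
    have hc : s[i] = c := by
      have := List.getElem_cons_drop hilen
      rw [hdrop] at this
      exact (List.cons.injEq _ _ _ _ ▸ this).1
    have hdrop' : s.drop (i+1) = rest := by
      have := List.getElem_cons_drop hilen
      rw [hdrop, hc] at this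
      exact (List.cons.injEq _ _ _ _ ▸ this).2
    obtain ⟨k, hk, hkpos⟩ := pvWidth_nat c
    have henum : PySem.List.enumerate (c :: rest) (i : Int) =
        ((i : Int), c) :: PySem.List.enumerate rest ((i : Int) + 1) := rfl
    rw [henum]
    simp only [List.foldl_cons, wrapA_step, wrapB_step]
    rw [hk]
    by_cases hbr : w + (k : Int) > cwid
    · rw [if_pos hbr, if_pos hbr]
      have hslice : PySem.List.slice ann (some (pn : Int)) (some ((pn : Int) + (k : Int))) =
          (ann.drop pn).take ((pn + k) - pn) := by
        have : ((pn : Int) + (k : Int)) = ((pn + k : Nat) : Int) := by push_cast; ring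
        rw [this, PySem.List.slice_natCast]
      have hcast : (pn : Int) + (k : Int) = ((pn + k : Nat) : Int) := by push_cast; ring
      have hone : [c] = (s.drop i).take ((i + 1) - i) := by
        have : (i + 1) - i = 1 := by omega
        rw [this, take_one_drop s i hilen, hc]
      have := ih (i+1) i pn (pn + k) (spans ++ [((tn : Int), (i : Int), (an : Int), (pn : Int))])
        (k : Int) hdrop' (by omega) (by omega) (by omega) (by omega)
      simp only [List.map_append, List.map_cons, List.map_nil, PySem.List.slice_natCast] at this
      rw [hslice, hcast, hone]
      have hia : ((i : Int) + 1) = (((i + 1 : Nat)) : Int) := by push_cast; ring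
      rw [hia]
      exact this
    · rw [if_neg hbr, if_neg hbr]
      have hcur : (s.drop tn).take (i - tn) ++ [c] = (s.drop tn).take ((i + 1) - tn) := by
        have h1 : (i + 1) - tn = (i - tn) + 1 := by omega
        rw [h1, List.take_add, List.drop_drop]
        have h2 : tn + (i - tn) = i := by omega
        rw [h2, take_one_drop s i hilen, hc]
      have hannacc : (ann.drop an).take (pn - an) ++
          PySem.List.slice ann (some (pn : Int)) (some ((pn : Int) + (k : Int))) =
          (ann.drop an).take ((pn + k) - an) := by
        have hcast : ((pn : Int) + (k : Int)) = ((pn + k : Nat) : Int) := by push_cast; ring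
        rw [hcast, PySem.List.slice_natCast]
        rcases take_drop_append ann an pn (pn + k) han with h | h
        · exact h
        · omega
      have hcast2 : (pn : Int) + (k : Int) = ((pn + k : Nat) : Int) := by push_cast; ring
      have := ih (i+1) tn an (pn + k) spans (w + (k : Int)) hdrop' (by omega) (by omega)
        (by omega) (by omega)
      rw [hcur, hannacc, hcast2]
      have hia : ((i : Int) + 1) = (((i + 1 : Nat)) : Int) := by push_cast; ring
      rw [hia]
      exact this

-- ===== VERDICT (by name: the statement is the Claim_ definition above) =====
theorem wrap_with_annotations_py_spec : Claim_equal_wrap_with_annotations_py := by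
  intro text full_ann col_width _
  unfold Spec_wrap_with_annotations_py wrap_with_annotations_py wrap_with_annotations_py_alt
  by_cases h : text.toList = []
  · rw [if_pos h, if_pos h]
  · rw [if_neg h, if_neg h]
    have := wrap_loop text.toList full_ann.toList col_width text.toList 0 0 0 0 [] 0
      (by simp) (by omega) (by omega) (by omega) (Or.inr h)
    simpa using this
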